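-- pv_equiv track=rewrite | github.com/daniel5426/talmudpedia | backend/app/services/published_app_draft_dev_patching.py | _split_begin_patch_segments
-- ===== SOURCE A (Python) =====
-- def _split_begin_patch_segments(lines: list[str]) -> list[list[str]]:
--     segments: list[list[str]] = []
--     current: list[str] = []
--     for line in lines:
--         if line.startswith("@@"):
--             if current:
--                 segments.append(current)
--                 current = []
--             continue
--         current.append(line)
--     if current:
--         segments.append(current)
--     return segments
-- ===== SOURCE B (Python) =====
-- def _split_begin_patch_segments(lines: list[str]) -> list[list[str]]:
--     segments: list[list[str]] = []
--     rest = lines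
--     while rest:
--         if rest[0].startswith("@@"):
--             rest = rest[1:]
--         else:
--             k = 1
--             while k < len(rest) and not rest[k].startswith("@@"):
--                 k += 1
--             segments.append(rest[:k])
--             rest = rest[k:]
--     return segments
-- ===== Notes on version B (the rewrite author's own statement) =====
-- stated objective: alternative
-- what changed: Replaces A's accumulator-with-flush loop (a 'current' buffer appended line by line and flushed at markers and at the end) by a two-level scan that skips markers and slices each maximal run of non-marker lines out whole.
import Mathlib
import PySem

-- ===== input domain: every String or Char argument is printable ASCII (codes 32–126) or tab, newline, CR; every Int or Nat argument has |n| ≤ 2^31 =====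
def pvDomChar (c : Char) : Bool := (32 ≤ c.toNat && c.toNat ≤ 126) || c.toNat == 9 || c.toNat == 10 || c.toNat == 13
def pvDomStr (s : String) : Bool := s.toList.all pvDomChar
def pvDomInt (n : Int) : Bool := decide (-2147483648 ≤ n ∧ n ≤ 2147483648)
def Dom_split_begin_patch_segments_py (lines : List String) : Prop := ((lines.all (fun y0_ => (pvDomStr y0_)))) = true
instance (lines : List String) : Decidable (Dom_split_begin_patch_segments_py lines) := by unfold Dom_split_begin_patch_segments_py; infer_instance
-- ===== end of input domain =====

-- B replaces A's accumulator-with-flush loop by a two-level scan slicing out maximal non-marker runs (alternative decomposition, same cost).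


-- ===== PORT A =====
-- for line in lines: accumulate into `current`, flush at "@@" markers and at the end
def splitA_step (st : List (List String) × List String) (line : String) :
    List (List String) × List String :=
  if PySem.Str.startswith line "@@" then
    if st.2.isEmpty then st else (st.1 ++ [st.2], [])
  else (st.1, st.2 ++ [line])

-- the post-loop "if current: segments.append(current)"
def splitA_finish (st : List (List String) × List String) : List (List String) :=
  if st.2.isEmpty then st.1 else st.1 ++ [st.2]

def split_begin_patch_segments_py (lines : List String) : List (List String) :=
  splitA_finish (lines.foldl splitA_step ([], []))

-- ===== PORT B =====
-- while rest: skip a marker, or slice out the maximal run of non-marker lines (rest[:k] / rest[k:])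
def split_begin_patch_segments_py_alt (lines : List String) : List (List String) :=
  match lines with
  | [] => []
  | l :: rest =>
    if PySem.Str.startswith l "@@" then split_begin_patch_segments_py_alt rest
    else
      (l :: rest.takeWhile (fun s => !PySem.Str.startswith s "@@")) ::
        split_begin_patch_segments_py_alt (rest.dropWhile (fun s => !PySem.Str.startswith s "@@"))
termination_by lines.length
decreasing_by
  · simp
  · simp
    exact List.length_dropWhile_le _ _

-- ===== PRECONDITION & SPEC =====
def Spec_split_begin_patch_segments_py (lines : List String) (out : List (List String)) : Prop := out = split_begin_patch_segments_py_alt lines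
instance (lines : List String) (out : List (List String)) : Decidable (Spec_split_begin_patch_segments_py lines out) := by unfold Spec_split_begin_patch_segments_py; infer_instance

-- ===== CLAIM (what is proved, stated in full; the proofs are below) =====
def Claim_equal_split_begin_patch_segments_py : Prop := ∀ (lines : List String), Dom_split_begin_patch_segments_py lines → Spec_split_begin_patch_segments_py lines (split_begin_patch_segments_py lines)

-- ===== LEMMAS AND PROOFS =====

-- "rest of A's run", given a pending buffer `cur`
def splitJ (cur : List String) (lines : List String) : List (List String) :=
  match lines with
  | [] => if cur.isEmpty then [] else [cur]
  | l :: rest =>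
    if PySem.Str.startswith l "@@" then
      if cur.isEmpty then splitJ [] rest else cur :: splitJ [] rest
    else splitJ (cur ++ [l]) rest

theorem splitA_inv (lines : List String) : ∀ (segs : List (List String)) (cur : List String),
    splitA_finish (lines.foldl splitA_step (segs, cur)) = segs ++ splitJ cur lines := by
  induction lines with
  | nil => intro segs cur; simp [splitA_finish, splitJ]; split <;> simp
  | cons l rest ih =>
    intro segs cur
    rw [List.foldl_cons]
    by_cases hm : PySem.Str.startswith l "@@" = true
    · have hm' : PySem.Chars.startswith l.toList ['@', '@'] = true := by simpa using hm
      by_cases hc : cur.isEmpty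
      · obtain rfl := List.isEmpty_iff.mp hc
        rw [show splitA_step (segs, []) l = (segs, []) by simp [splitA_step, hm']]
        rw [ih]
        simp [splitJ, hm']
      · have hc0 : cur.isEmpty = false := by simpa using hc
        rw [show splitA_step (segs, cur) l = (segs ++ [cur], []) by
              simp [splitA_step, hm', hc0]]
        rw [ih]
        simp [splitJ, hm', hc0]
    · have hm' : PySem.Chars.startswith l.toList ['@', '@'] = false := by
        simpa using hm
      rw [show splitA_step (segs, cur) l = (segs, cur ++ [l]) by simp [splitA_step, hm']]
      rw [ih]
      simp [splitJ, hm']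

theorem splitJ_alt (lines : List String) :
    (splitJ [] lines = split_begin_patch_segments_py_alt lines) ∧
    (∀ cur : List String, ¬ cur.isEmpty →
      splitJ cur lines =
        (cur ++ lines.takeWhile (fun s => !PySem.Str.startswith s "@@")) ::
          split_begin_patch_segments_py_alt
            (lines.dropWhile (fun s => !PySem.Str.startswith s "@@"))) := by
  induction lines with
  | nil =>
    constructor
    · simp [splitJ, split_begin_patch_segments_py_alt]
    · intro cur hc; simp [splitJ, hc, split_begin_patch_segments_py_alt]
  | cons l rest ih =>
    constructor
    · by_cases hm : PySem.Str.startswith l "@@" = true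
      · have hm' : PySem.Chars.startswith l.toList ['@', '@'] = true := by simpa using hm
        rw [splitJ, split_begin_patch_segments_py_alt]
        simp [hm', ih.1]
      · have hm' : PySem.Chars.startswith l.toList ['@', '@'] = false := by simpa using hm
        rw [splitJ, split_begin_patch_segments_py_alt]
        rw [show (if PySem.Str.startswith l "@@" = true then
              if ([] : List String).isEmpty then splitJ [] rest else [] :: splitJ [] rest
            else splitJ ([] ++ [l]) rest) = splitJ [l] rest by simp [hm']]
        rw [ih.2 [l] (by simp)]
        simp [hm']
    · intro cur hc
      have hc0 : cur.isEmpty = false := by simpa using hc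
      by_cases hm : PySem.Str.startswith l "@@" = true
      · have hm' : PySem.Chars.startswith l.toList ['@', '@'] = true := by simpa using hm
        have halt : split_begin_patch_segments_py_alt (l :: rest) =
            split_begin_patch_segments_py_alt rest := by
          rw [split_begin_patch_segments_py_alt]; simp [hm']
        rw [splitJ, List.takeWhile_cons, List.dropWhile_cons]
        simp [hm', hc0, ih.1, halt]
      · have hm' : PySem.Chars.startswith l.toList ['@', '@'] = false := by simpa using hm
        rw [splitJ]
        rw [show (if PySem.Str.startswith l "@@" = true then
              if cur.isEmpty then splitJ [] rest else cur :: splitJ [] rest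
            else splitJ (cur ++ [l]) rest) = splitJ (cur ++ [l]) rest by simp [hm']]
        rw [ih.2 (cur ++ [l]) (by simp)]
        rw [List.takeWhile_cons, List.dropWhile_cons]
        simp [hm']

-- ===== VERDICT (by name: the statement is the Claim_ definition above) =====
theorem split_begin_patch_segments_py_spec : Claim_equal_split_begin_patch_segments_py := by
  intro lines _
  show split_begin_patch_segments_py lines = _
  rw [split_begin_patch_segments_py]
  rw [splitA_inv lines [] []]
  rw [(splitJ_alt lines).1]
  simp
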